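-- pv_equiv track=rewrite | github.com/dluciv/python-intro-course | docs/examples/03.parallel/multiprocessing_effect.py | n_randoms
-- ===== SOURCE A (Python) =====
-- def n_randoms(n):
--     s = 123
--     m = 2**16+1
--     a = 75
--     c = 74
--     for i in range(n):
--         s = (a*s + c) % m
--
--     return s
-- ===== SOURCE B (Python) =====
-- def n_randoms(n):
--     # Closed form: since c == a - 1, s_k + 1 == (s_0 + 1) * a^k  (mod m),
--     # so s_n == 124 * 75^n - 1 (mod 65537); modular exponentiation is O(log n).
--     if n <= 0:
--         return 123
--     return (124 * pow(75, n, 65537) - 1) % 65537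
-- ===== Notes on version B (the rewrite author's own statement) =====
-- stated objective: faster
-- what changed: Replaces the n-step LCG iteration with the closed form s_n = 124*75^n - 1 mod 65537 (valid because c = a-1), computed by modular exponentiation.
import Mathlib
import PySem

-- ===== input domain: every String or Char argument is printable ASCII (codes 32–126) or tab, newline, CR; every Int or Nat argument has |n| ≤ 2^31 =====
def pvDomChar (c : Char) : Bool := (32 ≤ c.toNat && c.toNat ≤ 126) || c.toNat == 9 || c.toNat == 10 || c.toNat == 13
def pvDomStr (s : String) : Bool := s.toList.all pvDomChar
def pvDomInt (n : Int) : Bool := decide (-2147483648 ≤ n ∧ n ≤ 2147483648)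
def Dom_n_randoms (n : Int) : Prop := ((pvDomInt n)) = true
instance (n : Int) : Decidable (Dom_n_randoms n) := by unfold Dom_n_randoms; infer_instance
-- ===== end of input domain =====

-- B iterates the LCG n times; B computes the closed form 124*75^n - 1 mod 65537 (c = a-1), faster (O(log n) modular power in Python).

-- ===== PORT A =====
-- for i in range(n): s = (75*s + 74) % 65537, starting from s = 123
def n_randoms (n : Int) : Int :=
  (PySem.List.pyRange 0 n 1).foldl (fun s _ => PySem.Int.mod (75 * s + 74) 65537) 123

-- ===== PORT B =====
-- pow(75, n, 65537) is ported as (75 ^ n.toNat) % 65537 (its mathematical contract).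
def n_randoms_alt (n : Int) : Int :=
  if n ≤ 0 then 123
  else PySem.Int.mod (124 * (((75 : Int) ^ n.toNat) % 65537) - 1) 65537

-- ===== PRECONDITION & SPEC =====
def Spec_n_randoms (n : Int) (out : Int) : Prop := out = n_randoms_alt n
instance (n : Int) (out : Int) : Decidable (Spec_n_randoms n out) := by unfold Spec_n_randoms; infer_instance

-- ===== CLAIM (what is proved, stated in full; the proofs are below) =====
def Claim_equal_n_randoms : Prop := ∀ (n : Int), Dom_n_randoms n → Spec_n_randoms n (n_randoms n)

-- ===== LEMMAS AND PROOFS =====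

-- Loop invariant: from any reduced state s, k iterations land on ((s+1)*75^k - 1) % 65537.
lemma lcg_foldl_closed (l : List Int) :
    ∀ s : Int, 0 ≤ s → s < 65537 →
      l.foldl (fun s _ => PySem.Int.mod (75 * s + 74) 65537) s
        = ((s + 1) * 75 ^ l.length - 1) % 65537 := by
  induction l with
  | nil =>
      intro s h0 h1
      simp
      omega
  | cons x xs ih =>
      intro s h0 h1
      have hme : PySem.Int.mod (75 * s + 74) 65537 = (75 * s + 74) % 65537 :=
        PySem.Int.mod_eq_emod_of_pos (by norm_num)
      have hnn : 0 ≤ (75 * s + 74) % 65537 := Int.emod_nonneg _ (by norm_num)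
      have hlt : (75 * s + 74) % 65537 < 65537 := Int.emod_lt_of_pos _ (by norm_num)
      simp only [List.foldl_cons, hme]
      rw [ih _ hnn hlt]
      have hcong : ((75 * s + 74) % 65537 + 1) * 75 ^ xs.length - 1
          ≡ (75 * s + 74 + 1) * 75 ^ xs.length - 1 [ZMOD 65537] := by
        exact Int.ModEq.sub (Int.ModEq.mul (Int.ModEq.add (Int.emod_emod_of_dvd _ dvd_rfl) rfl) rfl) rfl
      calc (((75 * s + 74) % 65537 + 1) * 75 ^ xs.length - 1) % 65537
          = ((75 * s + 74 + 1) * 75 ^ xs.length - 1) % 65537 := hcong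
        _ = ((s + 1) * 75 ^ (x :: xs).length - 1) % 65537 := by
            simp [List.length_cons, pow_succ]; ring_nf

-- ===== VERDICT (by name: the statement is the Claim_ definition above) =====
theorem n_randoms_spec : Claim_equal_n_randoms := by
  intro n _
  unfold Spec_n_randoms n_randoms n_randoms_alt
  by_cases hn : n ≤ 0
  · rw [PySem.List.pyRange_one_eq_nil (by omega)]
    simp [hn]
  · rw [lcg_foldl_closed _ 123 (by norm_num) (by norm_num)]
    have hlen : (PySem.List.pyRange 0 n 1).length = n.toNat := by
      rw [PySem.List.length_pyRange_one]; omega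
    rw [hlen, if_neg hn, PySem.Int.mod_eq_emod_of_pos (by norm_num)]
    have : (124 * (((75:Int) ^ n.toNat) % 65537) - 1)
        ≡ 124 * (75:Int) ^ n.toNat - 1 [ZMOD 65537] :=
      Int.ModEq.sub (Int.ModEq.mul rfl (Int.emod_emod_of_dvd _ dvd_rfl)) rfl
    rw [show ((123:Int) + 1) = 124 by norm_num, (this.symm : _)]
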